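-- pv_equiv track=rewrite | github.com/damirko881/PythonIspit | 8.py | znakovi_u_stringovima
-- ===== SOURCE A (Python) =====
-- def znakovi_u_stringovima(listaStringova):
--     rezultat = {}
--
--     for string in listaStringova:
--         for znak in string:
--             if znak in rezultat:
--                 if string not in rezultat[znak]:
--                     rezultat[znak].append(string)
--             else:
--                 rezultat[znak] = [string]
--
--     return rezultat
-- ===== SOURCE B (Python) =====
-- def znakovi_u_stringovima(listaStringova):
--     rezultat = {}
--     for znak in dict.fromkeys("".join(listaStringova)):
--         lista = []
--         for string in listaStringova:
--             if znak in string and string not in lista: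
--                 lista.append(string)
--         rezultat[znak] = lista
--     return rezultat
-- ===== Notes on version B (the rewrite author's own statement) =====
-- stated objective: alternative
-- what changed: Inverted the loop nesting: B first computes the ordered set of distinct characters (dict.fromkeys of the joined strings), then for each character makes one dedup pass over the string list, instead of A's single accumulating pass that grows per-character lists while scanning each string's characters.
import Mathlib
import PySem

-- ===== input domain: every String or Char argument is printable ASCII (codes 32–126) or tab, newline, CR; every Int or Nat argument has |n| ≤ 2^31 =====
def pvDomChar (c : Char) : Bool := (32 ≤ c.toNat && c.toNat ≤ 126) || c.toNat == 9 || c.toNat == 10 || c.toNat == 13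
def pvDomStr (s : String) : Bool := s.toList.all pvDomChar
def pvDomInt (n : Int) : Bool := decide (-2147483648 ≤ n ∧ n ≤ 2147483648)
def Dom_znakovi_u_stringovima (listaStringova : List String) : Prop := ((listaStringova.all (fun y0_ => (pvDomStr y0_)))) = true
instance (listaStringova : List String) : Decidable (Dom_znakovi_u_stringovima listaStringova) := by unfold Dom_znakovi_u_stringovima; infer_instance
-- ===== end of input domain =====

-- B inverts A's loop nesting: it first builds the ordered list of distinct characters
-- (dict.fromkeys of the joined strings), then makes one dedup pass over the string list per
-- character, instead of A's single accumulating pass (objective: alternative decomposition).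

-- ===== PORT A =====
-- one inner-loop step of A: process character c (a 1-char Python string, key Char.toString c)
-- of string s against the accumulator dict; rezultat[znak].append(string) is the in-place
-- overwrite rez.insert k (old ++ [s])
def pvStepA (s : String) (rez : PySem.Dict String (List String)) (c : Char) :
    PySem.Dict String (List String) :=
  if rez.contains (Char.toString c) then
    if s ∈ rez.getD (Char.toString c) [] then rez
    else rez.insert (Char.toString c) (rez.getD (Char.toString c) [] ++ [s])
  else rez.insert (Char.toString c) [s]

def znakovi_u_stringovima (listaStringova : List String) : List (String × List String) :=
  (listaStringova.foldl
    (fun rez s => s.toList.foldl (pvStepA s) rez)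
    PySem.Dict.empty).items

-- ===== PORT B =====
def znakovi_u_stringovima_alt (listaStringova : List String) : List (String × List String) :=
  ((PySem.List.dedup (PySem.Str.join "" listaStringova).toList).foldl
    (fun rez c =>
      rez.insert (Char.toString c)
        (listaStringova.foldl
          (fun lista s => if c ∈ s.toList ∧ s ∉ lista then lista ++ [s] else lista) []))
    PySem.Dict.empty).items

-- ===== PRECONDITION & SPEC =====
def Spec_znakovi_u_stringovima (listaStringova : List String) (out : List (String × List String)) : Prop := out = znakovi_u_stringovima_alt listaStringova
instance (listaStringova : List String) (out : List (String × List String)) : Decidable (Spec_znakovi_u_stringovima listaStringova out) := by unfold Spec_znakovi_u_stringovima; infer_instance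

-- ===== CLAIM (what is proved, stated in full; the proofs are below) =====
def Claim_equal_znakovi_u_stringovima : Prop := ∀ (listaStringova : List String), Dom_znakovi_u_stringovima listaStringova → Spec_znakovi_u_stringovima listaStringova (znakovi_u_stringovima listaStringova)

-- ===== LEMMAS AND PROOFS =====

theorem char_toString_inj {a b : Char} (h : Char.toString a = Char.toString b) : a = b := by
  have := congrArg String.toList h; simpa using this

theorem stepA_getD_self (s : String) (d : PySem.Dict String (List String)) (c : Char) :
    (pvStepA s d c).getD (Char.toString c) [] =
      (if s ∈ d.getD (Char.toString c) [] then d.getD (Char.toString c) []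
       else d.getD (Char.toString c) [] ++ [s]) := by
  unfold pvStepA
  by_cases hcon : d.contains (Char.toString c) = true
  · by_cases hs : s ∈ d.getD (Char.toString c) []
    · rw [if_pos hcon, if_pos hs, if_pos hs]
    · rw [if_pos hcon, if_neg hs, if_neg hs, PySem.Dict.getD_insert_self]
  · have hd : d.getD (Char.toString c) [] = [] :=
      PySem.Dict.getD_of_not_contains d [] (by simpa using hcon)
    rw [if_neg hcon, PySem.Dict.getD_insert_self, hd]
    rw [if_neg (by simp)]
    simp

theorem stepA_getD_ne (s : String) (d : PySem.Dict String (List String)) {c c' : Char}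
    (h : c ≠ c') :
    (pvStepA s d c').getD (Char.toString c) [] = d.getD (Char.toString c) [] := by
  have hne : Char.toString c ≠ Char.toString c' := fun he => h (char_toString_inj he)
  unfold pvStepA
  split_ifs <;> first
    | rfl
    | rw [PySem.Dict.getD_insert_of_ne _ _ _ hne]

-- the value A keeps at key c.toString after the inner loop over the characters cs of s
theorem innerA_getD (s : String) (c : Char) :
    ∀ (cs : List Char) (d : PySem.Dict String (List String)),
      (cs.foldl (pvStepA s) d).getD (Char.toString c) [] =
        (if c ∈ cs ∧ s ∉ d.getD (Char.toString c) [] then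
          d.getD (Char.toString c) [] ++ [s] else d.getD (Char.toString c) []) := by
  intro cs
  induction cs with
  | nil => intro d; simp
  | cons c' cs ih =>
    intro d
    rw [List.foldl_cons, ih]
    by_cases hc : c' = c
    · subst hc
      rw [stepA_getD_self]
      by_cases hs : s ∈ d.getD (Char.toString c') []
      · rw [if_pos hs, if_neg (fun hh => hh.2 hs), if_neg (fun hh => hh.2 hs)]
      · rw [if_neg hs, if_neg (fun hh => hh.2 (by simp)),
            if_pos ⟨List.mem_cons_self, hs⟩]
    · rw [stepA_getD_ne s d (fun h => hc h.symm)]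
      have hmem : (c ∈ c' :: cs) ↔ c ∈ cs := by
        constructor
        · intro h; rcases List.mem_cons.1 h with h | h
          · exact absurd h.symm hc
          · exact h
        · exact fun h => List.mem_cons_of_mem _ h
      simp only [hmem]

theorem stepA_keys (s : String) (d : PySem.Dict String (List String)) (c : Char) :
    (pvStepA s d c).keys = PySem.Set.add d.keys (Char.toString c) := by
  unfold pvStepA
  by_cases hcon : d.contains (Char.toString c) = true
  · have hmem : Char.toString c ∈ d.keys := (PySem.Dict.contains_iff_mem_keys d _).1 hcon
    rw [if_pos hcon, PySem.Set.add_of_mem hmem]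
    split_ifs
    · rfl
    · exact PySem.Dict.keys_insert_of_contains d _ hcon
  · have hmem : Char.toString c ∉ d.keys :=
      fun h => hcon ((PySem.Dict.contains_iff_mem_keys d _).2 h)
    rw [if_neg hcon, PySem.Dict.keys_insert_of_not_contains d _ (by simpa using hcon),
        PySem.Set.add_of_not_mem hmem]

theorem innerA_keys (s : String) :
    ∀ (cs : List Char) (d : PySem.Dict String (List String)),
      (cs.foldl (pvStepA s) d).keys = PySem.Set.update d.keys (cs.map Char.toString) := by
  intro cs
  induction cs with
  | nil => intro d; simp [PySem.Set.update_nil]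
  | cons c' cs ih =>
    intro d
    rw [List.foldl_cons, ih, List.map_cons, PySem.Set.update_cons, stepA_keys]

theorem outerA_keys :
    ∀ (l : List String) (d : PySem.Dict String (List String)),
      (l.foldl (fun rez s => s.toList.foldl (pvStepA s) rez) d).keys =
        PySem.Set.update d.keys (l.flatMap (fun s => s.toList.map Char.toString)) := by
  intro l
  induction l with
  | nil => intro d; simp [PySem.Set.update_nil]
  | cons s l ih =>
    intro d
    rw [List.foldl_cons, ih, innerA_keys, List.flatMap_cons, PySem.Set.update_append]

-- the value A keeps at key c.toString after the outer loop IS B's inner accumulation loop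
theorem outerA_getD (c : Char) :
    ∀ (l : List String) (d : PySem.Dict String (List String)),
      (l.foldl (fun rez s => s.toList.foldl (pvStepA s) rez) d).getD (Char.toString c) [] =
        l.foldl (fun lista s => if c ∈ s.toList ∧ s ∉ lista then lista ++ [s] else lista)
          (d.getD (Char.toString c) []) := by
  intro l
  induction l with
  | nil => intro d; rfl
  | cons s l ih =>
    intro d
    rw [List.foldl_cons, ih, innerA_getD, List.foldl_cons]

theorem ofList_map_toString (xs : List Char) :
    PySem.Set.ofList (xs.map Char.toString) = (PySem.Set.ofList xs).map Char.toString := by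
  induction xs with
  | nil => rfl
  | cons x xs ih =>
    rw [List.map_cons, PySem.Set.ofList_cons, PySem.Set.ofList_cons, ih, List.map_cons]
    rw [PySem.Set.discard, PySem.Set.discard, List.filter_map]
    congr 1
    congr 1
    apply List.filter_congr
    intro y _
    by_cases h : y = x
    · subst h; simp
    · have h2 : Char.toString y ≠ Char.toString x := fun he => h (char_toString_inj he)
      have e1 : (y.toString == x.toString) = false := beq_false_of_ne h2
      have e2 : (y == x) = false := beq_false_of_ne h
      rw [show ((fun t => !t == x.toString) ∘ Char.toString) y = !(y.toString == x.toString) from rfl,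
          e1, e2]

theorem chars_join_flatten (l : List (List Char)) : PySem.Chars.join [] l = l.flatten := by
  induction l with
  | nil => simp [PySem.Chars.join_nil]
  | cons x xs ih => cases xs with
    | nil => simp [PySem.Chars.join_singleton]
    | cons y ys => rw [PySem.Chars.join_cons_cons]; simp at ih ⊢; simpa using ih

theorem znakovi_main (l : List String) : znakovi_u_stringovima l = znakovi_u_stringovima_alt l := by
  have hinj : Function.Injective Char.toString := fun a b h => char_toString_inj h
  have hjoin : (PySem.Str.join "" l).toList = l.flatMap String.toList := by
    simp [pysem]; rw [chars_join_flatten]; simp [List.flatMap_def]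
  have hkeys : (l.foldl (fun rez s => s.toList.foldl (pvStepA s) rez) PySem.Dict.empty).keys =
      (PySem.Set.ofList (l.flatMap String.toList)).map Char.toString := by
    rw [outerA_keys, PySem.Dict.keys_empty, PySem.Set.update_nil_left, ← ofList_map_toString]
    congr 1
    rw [List.map_flatMap]
  have hnodup : ((PySem.Set.ofList (l.flatMap String.toList)).map Char.toString).Nodup :=
    (PySem.Set.nodup_ofList _).map hinj
  rw [znakovi_u_stringovima,
      PySem.Dict.items_eq_map_keys _ (by rw [hkeys]; exact hnodup) [], hkeys, List.map_map]
  rw [znakovi_u_stringovima_alt, hjoin, PySem.List.dedup_eq_ofList,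
      PySem.Dict.items_foldl_insert_fresh _ _ _ _
        (fun a _ => PySem.Dict.contains_empty _) hnodup,
      show PySem.Dict.empty.items ++ _ = _ from rfl]
  apply List.map_congr_left
  intro c _
  simp only [Function.comp]
  congr 1
  rw [outerA_getD, PySem.Dict.getD_empty]

-- ===== VERDICT (by name: the statement is the Claim_ definition above) =====
theorem znakovi_u_stringovima_spec : Claim_equal_znakovi_u_stringovima := by
  intro l _
  unfold Spec_znakovi_u_stringovima
  exact znakovi_main l
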